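-- pv_equiv track=rewrite | github.com/PhlipPhlops/covid_ICU_prediction | cast_to_glove_note_timeseries.py | pad_punctuation
-- ===== SOURCE A (Python) =====
-- def pad_punctuation(note):
--     # Places spaces around puncatuations so they'll be
--     # separated by a .split() method and recognized
--     # by GloVe
--     PUNCTS = "!\"#$%'()*+,-./:;<=>?@[\]^_`{|}~"
--     updated_list = []
--     for i in range(len(note)):
--         if note[i] in PUNCTS:
--             updated_list.extend([" ", note[i], " "])
--         else:
--             updated_list.append(note[i])
--     return ''.join(updated_list)
-- ===== SOURCE B (Python) =====
-- def pad_punctuation(note):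
--     # Places spaces around punctuations so they'll be
--     # separated by a .split() method and recognized
--     # by GloVe
--     PUNCTS = "!\"#$%'()*+,-./:;<=>?@[\]^_`{|}~"
--     for p in PUNCTS:
--         note = note.replace(p, " " + p + " ")
--     return note
-- ===== Notes on version B (the rewrite author's own statement) =====
-- stated objective: simpler
-- what changed: Replaces A's single character-at-a-time loop with membership test and list building by 32 staged whole-string str.replace passes, one per punctuation character; correct because each replacement only introduces spaces and the character itself, which no later pass touches.
import Mathlib
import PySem

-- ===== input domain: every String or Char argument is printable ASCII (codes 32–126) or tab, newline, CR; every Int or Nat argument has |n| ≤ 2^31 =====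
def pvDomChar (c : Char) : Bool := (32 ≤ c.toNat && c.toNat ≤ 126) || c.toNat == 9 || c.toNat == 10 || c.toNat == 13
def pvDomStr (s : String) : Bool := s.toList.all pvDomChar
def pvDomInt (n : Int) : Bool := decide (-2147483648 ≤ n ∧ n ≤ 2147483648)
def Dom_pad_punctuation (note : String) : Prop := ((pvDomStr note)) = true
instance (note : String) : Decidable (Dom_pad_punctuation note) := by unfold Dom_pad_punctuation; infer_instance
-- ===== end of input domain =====

-- B replaces A's character-at-a-time loop by 32 staged whole-string str.replace
-- passes, one per punctuation character (simpler decomposition; no speed claim).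

-- ===== PORT A =====
-- PUNCTS as in A ("[\]" in Python keeps the backslash; note '&' is absent)
def pvPUNCTS : List Char := "!\"#$%'()*+,-./:;<=>?@[\\]^_`{|}~".toList

def pad_punctuation (note : String) : String :=
  String.ofList
    ((PySem.List.pyRange 0 note.toList.length 1).foldl
      (fun acc i =>
        if PySem.List.pyGetD note.toList i ' ' ∈ pvPUNCTS then
          acc ++ [' ', PySem.List.pyGetD note.toList i ' ', ' ']
        else
          acc ++ [PySem.List.pyGetD note.toList i ' '])
      [])

-- ===== PORT B =====
-- for p in PUNCTS: note = note.replace(p, " " + p + " ")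
def pad_punctuation_alt (note : String) : String :=
  pvPUNCTS.foldl
    (fun s p => PySem.Str.replace s (String.ofList [p]) (String.ofList [' ', p, ' ']))
    note

-- ===== PRECONDITION & SPEC =====
def Spec_pad_punctuation (note : String) (out : String) : Prop := out = pad_punctuation_alt note
instance (note : String) (out : String) : Decidable (Spec_pad_punctuation note out) := by unfold Spec_pad_punctuation; infer_instance

-- ===== CLAIM (what is proved, stated in full; the proofs are below) =====
def Claim_equal_pad_punctuation : Prop := ∀ (note : String), Dom_pad_punctuation note → Spec_pad_punctuation note (pad_punctuation note)

-- ===== LEMMAS AND PROOFS =====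

-- the per-prefix expansion function: what the string looks like after the
-- punctuation characters in `done` have been processed
def pvExpand (done : List Char) (c : Char) : List Char :=
  if c ∈ done then [' ', c, ' '] else [c]

-- replace with a single non-empty pattern char is a flatMap
theorem pv_go_single (p : Char) (new : List Char) :
    ∀ (l acc : List Char) (fuel : Nat), l.length ≤ fuel →
      PySem.Chars.replace.go [p] new fuel l acc
        = acc.reverse ++ l.flatMap (fun c => if c = p then new else [c]) := by
  intro l
  induction l with
  | nil =>
      intro acc fuel _
      cases fuel <;> simp [PySem.Chars.replace.go]
  | cons c t ih =>
      intro acc fuel hf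
      cases fuel with
      | zero => simp at hf
      | succ fuel =>
          simp only [List.length_cons, Nat.succ_le_succ_iff] at hf
          by_cases hc : c = p
          · subst hc
            simp [PySem.Chars.replace.go, List.isPrefixOf, ih _ fuel hf]
          · have : ([p].isPrefixOf (c :: t)) = false := by
              simp [List.isPrefixOf]; exact fun h => hc h.symm
            simp [PySem.Chars.replace.go, this, ih _ fuel hf, hc]

theorem pv_replace_single (p : Char) (new s : List Char) :
    PySem.Chars.replace s [p] new
      = s.flatMap (fun c => if c = p then new else [c]) := by
  simp [PySem.Chars.replace, pv_go_single p new s [] s.length le_rfl]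

theorem pv_flatMap_flatMap (f g : Char → List Char) (l : List Char) :
    (l.flatMap f).flatMap g = l.flatMap (fun x => (f x).flatMap g) := by
  induction l with
  | nil => rfl
  | cons a l ih => simp [List.flatMap_cons, List.flatMap_append, ih]

-- one staged pass extends the processed prefix by one character
theorem pv_step (s : List Char) (done : List Char) (p : Char)
    (hp : p ∉ done) (hsp : p ≠ ' ') :
    PySem.Chars.replace (s.flatMap (pvExpand done)) [p] [' ', p, ' ']
      = s.flatMap (pvExpand (done ++ [p])) := by
  rw [pv_replace_single, pv_flatMap_flatMap]
  refine List.flatMap_congr (fun c _ => ?_)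
  unfold pvExpand
  by_cases hd : c ∈ done
  · have hcp : c ≠ p := fun h => hp (h ▸ hd)
    simp [hd, hcp, hsp.symm, List.mem_append]
  · by_cases hcp : c = p
    · subst hcp; simp [hd]
    · simp [hd, hcp, List.mem_append]

-- folding the staged passes over a suffix `ps` of distinct characters
theorem pv_fold (s : List Char) :
    ∀ (ps done : List Char), (done ++ ps).Nodup → ' ' ∉ ps →
      ps.foldl (fun r p => PySem.Chars.replace r [p] [' ', p, ' '])
          (s.flatMap (pvExpand done))
        = s.flatMap (pvExpand (done ++ ps)) := by
  intro ps
  induction ps with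
  | nil => intro done _ _; simp
  | cons p t ih =>
      intro done hnd hsp
      have hp : p ∉ done := by
        intro h
        exact (List.disjoint_of_nodup_append hnd) h (List.mem_cons_self ..)
      have hps : p ≠ ' ' := fun h => hsp (h ▸ List.mem_cons_self ..)
      have hnd' : ((done ++ [p]) ++ t).Nodup := by
        simpa [List.append_assoc] using hnd
      have hsp' : ' ' ∉ t := fun h => hsp (List.mem_cons_of_mem _ h)
      simp only [List.foldl_cons, pv_step s done p hp hps, ih (done ++ [p]) hnd' hsp']
      simp [List.append_assoc]

-- the two facts about the punctuation list the proof needs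
theorem pv_puncts_nodup : pvPUNCTS.Nodup := by decide
theorem pv_space_not_punct : ' ' ∉ pvPUNCTS := by decide

-- B's result, characterised as the flatMap expansion
theorem pv_alt_toList (note : String) :
    (pad_punctuation_alt note).toList
      = note.toList.flatMap (pvExpand pvPUNCTS) := by
  unfold pad_punctuation_alt
  have key : ∀ (ps : List Char) (s : String),
      (ps.foldl (fun s p =>
          PySem.Str.replace s (String.ofList [p]) (String.ofList [' ', p, ' '])) s).toList
        = ps.foldl (fun r p => PySem.Chars.replace r [p] [' ', p, ' ']) s.toList := by
    intro ps
    induction ps with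
    | nil => intro s; rfl
    | cons p t ih =>
        intro s
        simp only [List.foldl_cons, ih, PySem.Str.toList_replace, String.toList_ofList]
  rw [key]
  have h := pv_fold note.toList pvPUNCTS [] (by simpa using pv_puncts_nodup) pv_space_not_punct
  have h0 : note.toList.flatMap (pvExpand []) = note.toList := by
    have he : pvExpand [] = fun c => [c] := by funext c; simp [pvExpand]
    rw [he]; simp
  rw [h0, List.nil_append] at h
  exact h

-- ===== VERDICT (by name: the statement is the Claim_ definition above) =====
theorem pad_punctuation_spec : Claim_equal_pad_punctuation := by
  intro note _
  unfold Spec_pad_punctuation pad_punctuation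
  rw [PySem.List.foldl_pyRange_zero_pyGetD' note.toList ' '
        (fun acc c => if c ∈ pvPUNCTS then acc ++ [' ', c, ' '] else acc ++ [c]) []]
  have hsplit :
      (fun (acc : List Char) (c : Char) =>
          if c ∈ pvPUNCTS then acc ++ [' ', c, ' '] else acc ++ [c])
        = fun acc c => acc ++ (if c ∈ pvPUNCTS then [' ', c, ' '] else [c]) := by
    funext acc c; split <;> rfl
  rw [hsplit, PySem.List.foldl_append_eq_flatMap]
  have : note.toList.flatMap (fun c => if c ∈ pvPUNCTS then [' ', c, ' '] else [c])
      = (pad_punctuation_alt note).toList := by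
    rw [pv_alt_toList]; rfl
  rw [List.nil_append, this]
  exact String.ofList_toList
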